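-- pv_equiv track=rewrite | github.com/Lexberry1/static-site | src/gencontent.py | extract_title
-- ===== SOURCE A (Python) =====
-- def extract_title(markdown):
-- 	lines = markdown.split('\n')
-- 	for line in lines:
-- 		if line.startswith('# '):
-- 			new_line = line[2:]
-- 			final = new_line.strip()
-- 			return final
-- 	raise Exception('No h1 header')
-- ===== SOURCE B (Python) =====
-- def _extract_from(markdown, start):
--     end = markdown.find('\n', start)
--     if end == -1:
--         end = len(markdown)
--     return markdown[start:end].strip()
--
-- def extract_title(markdown):
--     if markdown.startswith('# '):
--         return _extract_from(markdown, 2)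
--     i = markdown.find('\n# ')
--     if i == -1:
--         raise Exception('No h1 header')
--     return _extract_from(markdown, i + 3)
-- ===== Notes on version B (the rewrite author's own statement) =====
-- stated objective: alternative
-- what changed: B drops the split-into-lines loop: it locates the first h1 line directly by searching the raw string for a leading '# ' or the substring '\n# ', then slices up to the next '\n' and strips, building no intermediate line list.
import Mathlib
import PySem

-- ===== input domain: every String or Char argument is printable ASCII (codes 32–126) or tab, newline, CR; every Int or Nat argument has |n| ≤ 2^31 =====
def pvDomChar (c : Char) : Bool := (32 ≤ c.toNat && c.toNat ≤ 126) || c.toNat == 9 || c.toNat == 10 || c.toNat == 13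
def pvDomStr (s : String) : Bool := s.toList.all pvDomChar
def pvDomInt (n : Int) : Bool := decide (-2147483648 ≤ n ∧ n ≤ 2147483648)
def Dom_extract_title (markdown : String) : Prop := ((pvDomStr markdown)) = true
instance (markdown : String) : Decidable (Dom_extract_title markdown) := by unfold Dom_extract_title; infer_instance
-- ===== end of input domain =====

-- B replaces A's split-into-lines-and-loop with a direct substring search for the
-- first "# " at a line start (objective: alternative; one scan of the raw string,
-- no intermediate line list).  On inputs with no h1 line both Pythons raise; Pre_
-- excludes exactly those.

-- ===== PORT A =====
def extractLoopA : List String → String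
  | [] => ""  -- Python: raise Exception('No h1 header'); excluded by Pre_
  | line :: rest =>
    if PySem.Str.startswith line "# " then
      PySem.Str.strip (PySem.Str.slice line (some 2) none)
    else extractLoopA rest

def extract_title (markdown : String) : String :=
  match PySem.Str.split? markdown "\n" with
  | none => ""  -- unreachable: the separator "\n" is nonempty
  | some lines => extractLoopA lines

-- ===== PORT B =====
def extractFromB (markdown : String) (start : Int) : String :=
  let e := PySem.Str.findFrom markdown "\n" start
  let stop := if e = -1 then PySem.Str.len markdown else e
  PySem.Str.strip (PySem.Str.slice markdown (some start) (some stop))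

def extract_title_alt (markdown : String) : String :=
  if PySem.Str.startswith markdown "# " then extractFromB markdown 2
  else
    let i := PySem.Str.find markdown "\n# "
    if i = -1 then ""  -- Python: raise Exception('No h1 header'); excluded by Pre_
    else extractFromB markdown (i + 3)

-- ===== PRECONDITION & SPEC =====
-- Pre_ holds exactly when some line of markdown starts with "# "; on all other
-- inputs the Python A (and the Python B) raise Exception('No h1 header').
def Pre_extract_title (markdown : String) : Prop :=
  PySem.Str.startswith markdown "# " = true ∨ PySem.Str.isIn "\n# " markdown = true
instance (markdown : String) : Decidable (Pre_extract_title markdown) := by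
  unfold Pre_extract_title; infer_instance

def pvWitness_extract_title : String := "# Hello\nworld"

def Spec_extract_title (markdown : String) (out : String) : Prop := out = extract_title_alt markdown
instance (markdown : String) (out : String) : Decidable (Spec_extract_title markdown out) := by
  unfold Spec_extract_title; infer_instance

-- ===== CLAIM (what is proved, stated in full; the proofs are below) =====
def Claim_equal_extract_title : Prop := ∀ (markdown : String), Dom_extract_title markdown → Pre_extract_title markdown → Spec_extract_title markdown (extract_title markdown)

-- ===== LEMMAS AND PROOFS =====

/-- Proof-side model of `markdown.split('\n')`. -/
def splitNL : List Char → List (List Char)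
  | [] => [[]]
  | c :: rest =>
    if c = '\n' then [] :: splitNL rest
    else
      match splitNL rest with
      | h :: t => (c :: h) :: t
      | [] => [[c]]

/-- Proof-side model of A's loop, on char lists. -/
def loopAC : List (List Char) → List Char
  | [] => []
  | l :: rest =>
    if ['#', ' '].isPrefixOf l then PySem.Chars.strip (l.drop 2) else loopAC rest

/-- Proof-side model of B's `_extract_from`, on char lists. -/
def coreBC (cs : List Char) (start : Int) : List Char :=
  let e := PySem.Chars.findFrom cs ['\n'] start none
  let stop := if e = -1 then (cs.length : Int) else e
  PySem.Chars.strip (PySem.Chars.slice cs (some start) (some stop))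

/-- Proof-side model of B, on char lists. -/
def altBC (cs : List Char) : List Char :=
  if PySem.Chars.startswith cs ['#', ' '] then coreBC cs 2
  else
    let i := PySem.Chars.find cs ['\n', '#', ' ']
    if i = -1 then [] else coreBC cs (i + 3)

/-- Structural model of `PySem.Chars.find`: position of the first occurrence. -/
def findC (sub : List Char) : List Char → Option Nat
  | [] => if sub.isEmpty then some 0 else none
  | c :: t => if sub.isPrefixOf (c :: t) then some 0 else (findC sub t).map (· + 1)

theorem findgo_eq (sub : List Char) : ∀ (cs : List Char) (k : Nat),
    PySem.Chars.find.go sub cs k = match findC sub cs with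
      | none => -1
      | some j => ((k + j : Nat) : Int)
  | [], k => by simp [PySem.Chars.find.go, findC]; split <;> simp
  | c :: t, k => by
    rw [PySem.Chars.find.go]
    simp only [findC]
    split
    · simp
    · rw [findgo_eq sub t (k + 1)]
      cases h : findC sub t
      · simp
      · simp
        ring

theorem find_eq_findC (cs sub : List Char) :
    PySem.Chars.find cs sub = match findC sub cs with
      | none => -1
      | some j => (j : Int) := by
  show PySem.Chars.find.go sub cs 0 = _
  rw [findgo_eq]
  cases h : findC sub cs <;> simp

theorem findC_nl_eq_none {cs : List Char} (q : List Char) (h : '\n' ∉ cs) :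
    findC ('\n' :: q) cs = none := by
  induction cs with
  | nil => rfl
  | cons c t ih =>
    simp only [List.mem_cons, not_or] at h
    simp only [findC]
    rw [if_neg (by simp [List.isPrefixOf]; intro hc; exact (h.1 hc).elim), ih h.2]
    rfl

theorem findC_nl_append {a : List Char} (b : List Char) (h : '\n' ∉ a) :
    findC ['\n'] (a ++ '\n' :: b) = some a.length := by
  induction a with
  | nil => simp [findC, List.isPrefixOf]
  | cons c t ih =>
    simp only [List.mem_cons, not_or] at h
    simp only [List.cons_append, findC]
    rw [if_neg (by simp [List.isPrefixOf]; intro hc; exact (h.1 hc).elim), ih h.2]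
    simp

theorem findC_shift {l : List Char} (q cs' : List Char) (h : '\n' ∉ l) :
    findC ('\n' :: q) (l ++ cs') = (findC ('\n' :: q) cs').map (· + l.length) := by
  induction l with
  | nil => cases hx : findC ('\n' :: q) cs' <;> simp [hx]
  | cons c t ih =>
    simp only [List.mem_cons, not_or] at h
    have hneg : ¬ (('\n' :: q).isPrefixOf (c :: (t ++ cs')) = true) := by
      simp [List.isPrefixOf]
      intro hc
      exact (h.1 hc).elim
    simp only [List.cons_append, findC]
    rw [if_neg hneg, ih h.2]
    cases hx : findC ('\n' :: q) cs'
    · simp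
    · simp
      omega

theorem findC_le {sub cs : List Char} {j : Nat} (h : findC sub cs = some j) :
    j + sub.length ≤ cs.length := by
  induction cs generalizing j with
  | nil =>
    simp only [findC] at h
    split at h
    · rename_i hs
      simp only [Option.some.injEq] at h
      simp only [List.isEmpty_iff] at hs
      subst hs
      simp [← h]
    · exact absurd h (by simp)
  | cons c t ih =>
    simp only [findC] at h
    split at h
    · rename_i hp
      have := (List.isPrefixOf_iff_prefix.mp hp).length_le
      simp at h
      omega
    · simp at h
      obtain ⟨j', hj', rfl⟩ := h
      have := ih hj'
      simp; omega

theorem splitNL_ne_nil (cs : List Char) : splitNL cs ≠ [] := by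
  cases cs with
  | nil => simp [splitNL]
  | cons c rest =>
    simp only [splitNL]
    split
    · simp
    · split <;> simp

theorem splitOn_go_spec : ∀ (fuel : Nat) (l cur : List Char) (acc : List (List Char)),
    l.length < fuel →
    PySem.Chars.splitOn.go ['\n'] fuel l cur acc
      = acc.reverse ++ (cur.reverse ++ (splitNL l).headI) :: (splitNL l).tail := by
  intro fuel
  induction fuel with
  | zero => intro l cur acc h; omega
  | succ n ih =>
    intro l cur acc hl
    cases l with
    | nil =>
      rw [PySem.Chars.splitOn.go]
      · simp [splitNL]
      · omega
    | cons c rest =>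
      rw [PySem.Chars.splitOn.go]
      by_cases hc : c = '\n'
      · subst hc
        rw [if_pos (by simp [List.isPrefixOf])]
        simp only [List.length_nil, List.length_cons, List.drop_succ_cons, List.drop_zero]
        rw [ih rest [] (cur.reverse :: acc) (by simp at hl; omega)]
        simp only [splitNL, reduceIte]
        cases h : splitNL rest with
        | nil => exact absurd h (splitNL_ne_nil rest)
        | cons h0 t0 => simp
      · rw [if_neg (by simp [List.isPrefixOf]; exact fun h => absurd h.symm hc)]
        rw [ih rest (c :: cur) acc (by simp at hl; omega)]
        simp only [splitNL, if_neg hc]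
        cases h : splitNL rest with
        | nil => exact absurd h (splitNL_ne_nil rest)
        | cons h0 t0 => simp

theorem splitOn_eq_splitNL (cs : List Char) :
    PySem.Chars.splitOn cs ['\n'] = splitNL cs := by
  show PySem.Chars.splitOn.go ['\n'] (cs.length + 1) cs [] [] = _
  rw [splitOn_go_spec (cs.length + 1) cs [] [] (by omega)]
  cases h : splitNL cs with
  | nil => exact absurd h (splitNL_ne_nil cs)
  | cons h0 t0 => simp

theorem splitNL_no_nl {cs : List Char} (h : '\n' ∉ cs) : splitNL cs = [cs] := by
  induction cs with
  | nil => rfl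
  | cons c t ih =>
    simp only [List.mem_cons, not_or] at h
    simp only [splitNL, ih h.2]
    rw [if_neg (fun hh => h.1 hh.symm)]

theorem splitNL_append {l : List Char} (rest : List Char) (h : '\n' ∉ l) :
    splitNL (l ++ '\n' :: rest) = l :: splitNL rest := by
  induction l with
  | nil => simp [splitNL]
  | cons c t ih =>
    simp only [List.mem_cons, not_or] at h
    simp only [List.cons_append, splitNL, ih h.2]
    rw [if_neg (fun hh => h.1 hh.symm)]

theorem prefix_hash_space (l rest : List Char) :
    ['#', ' '].isPrefixOf (l ++ '\n' :: rest) = ['#', ' '].isPrefixOf l := by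
  match l with
  | [] => simp [List.isPrefixOf]
  | [c] => simp [List.isPrefixOf]
  | c1 :: c2 :: l' => simp [List.isPrefixOf]

theorem coreBC_natCast (cs : List Char) (k : Nat) (hk : k ≤ cs.length) :
    coreBC cs (k : Int)
      = PySem.Chars.strip ((cs.drop k).take
          (match findC ['\n'] (cs.drop k) with
           | none => cs.length - k
           | some j => j)) := by
  unfold coreBC
  rw [PySem.Chars.findFrom_natCast cs ['\n'] k hk, find_eq_findC]
  cases h : findC ['\n'] (cs.drop k) with
  | none =>
    simp only [PySem.Chars.slice_eq_listSlice, reduceIte]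
    rw [PySem.List.slice_natCast]
  | some j =>
    have h1 : ¬ ((j : Int) = -1) := by omega
    have h2 : ¬ ((k : Int) + (j : Int) = -1) := by omega
    simp only [h1, if_false, if_neg h2, PySem.Chars.slice_eq_listSlice]
    rw [show (k : Int) + (j : Int) = ((k + j : Nat) : Int) by push_cast; ring,
      PySem.List.slice_natCast, show k + j - k = j by omega]

theorem coreBC_shift {l : List Char} (rest : List Char) (s : Nat) (hs : s ≤ rest.length) :
    coreBC (l ++ '\n' :: rest) ((l.length + 1 + s : Nat) : Int) = coreBC rest (s : Int) := by
  have hdrop : (l ++ '\n' :: rest).drop (l.length + 1 + s) = rest.drop s := by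
    rw [List.drop_append, List.drop_of_length_le (by omega),
      show l.length + 1 + s - l.length = s + 1 by omega, List.drop_succ_cons, List.nil_append]
  rw [coreBC_natCast _ _ (by simp; omega), coreBC_natCast rest s hs, hdrop]
  cases h : findC ['\n'] (rest.drop s) with
  | none =>
    simp only []
    congr 2
    simp
    omega
  | some j => simp

theorem first_nl_split {cs : List Char} (h : '\n' ∈ cs) :
    ∃ l rest, cs = l ++ '\n' :: rest ∧ '\n' ∉ l := by
  induction cs with
  | nil => simp at h
  | cons c t ih =>
    by_cases hc : c = '\n'
    · exact ⟨[], t, by rw [hc]; rfl, by simp⟩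
    · have ht : '\n' ∈ t := by
        rcases List.mem_cons.mp h with h1 | h1
        · exact (hc h1.symm).elim
        · exact h1
      obtain ⟨l', r', hh, hln⟩ := ih ht
      refine ⟨c :: l', r', by rw [List.cons_append, ← hh], ?_⟩
      simp only [List.mem_cons, not_or]
      exact ⟨fun hx => hc hx.symm, hln⟩

theorem altBC_no_h1 {cs : List Char}
    (hsw : PySem.Chars.startswith cs ['#', ' '] = false) :
    altBC cs = match findC ['\n', '#', ' '] cs with
      | none => []
      | some m => coreBC cs ((m : Int) + 3) := by
  unfold altBC
  rw [hsw]
  simp only [Bool.false_eq_true, if_false, find_eq_findC]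
  cases h : findC ['\n', '#', ' '] cs with
  | none => simp
  | some m =>
    have hm : ¬ ((m : Int) = -1) := by omega
    simp [hm]

theorem main_aux : ∀ (n : Nat) (cs : List Char), cs.length ≤ n →
    altBC cs = loopAC (splitNL cs) := by
  intro n
  induction n with
  | zero =>
    intro cs h
    have : cs = [] := by cases cs <;> simp_all
    subst this
    decide
  | succ n ih =>
    intro cs hcs
    by_cases hnl : '\n' ∈ cs
    · obtain ⟨l, rest, hsplit, hl⟩ := first_nl_split hnl
      subst hsplit
      have hrest : rest.length ≤ n := by simp at hcs; omega
      rw [splitNL_append rest hl]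
      simp only [loopAC]
      by_cases hp : ['#', ' '].isPrefixOf l = true
      · -- the first line is the h1 line
        rw [if_pos hp]
        obtain ⟨l2, rfl⟩ : ∃ l2, l = '#' :: ' ' :: l2 := by
          obtain ⟨t, ht⟩ := List.isPrefixOf_iff_prefix.mp hp
          exact ⟨t, ht.symm⟩
        have hl2 : '\n' ∉ l2 := fun hx =>
          hl (List.mem_cons_of_mem _ (List.mem_cons_of_mem _ hx))
        unfold altBC
        rw [if_pos (by simp [PySem.Chars.startswith, List.isPrefixOf])]
        have h2le : 2 ≤ ('#' :: ' ' :: l2 ++ '\n' :: rest).length := by simp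
        rw [show (2 : Int) = ((2 : Nat) : Int) by norm_num, coreBC_natCast _ 2 h2le]
        have hdrop2 : ('#' :: ' ' :: l2 ++ '\n' :: rest).drop 2 = l2 ++ '\n' :: rest := by
          simp
        rw [hdrop2, findC_nl_append rest hl2]
        simp only [List.drop_succ_cons, List.drop_zero]
        rw [List.take_left' rfl]
      · rw [if_neg hp]
        have hswcs : PySem.Chars.startswith (l ++ '\n' :: rest) ['#', ' '] = false := by
          simp only [PySem.Chars.startswith, prefix_hash_space]
          exact Bool.eq_false_iff.mpr hp
        rw [altBC_no_h1 hswcs,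
          findC_shift ['#', ' '] ('\n' :: rest) hl,
          show findC ['\n', '#', ' '] ('\n' :: rest)
              = if ['#', ' '].isPrefixOf rest then some 0
                else (findC ['\n', '#', ' '] rest).map (· + 1) from by
            simp [findC, List.isPrefixOf],
          ← ih rest hrest]
        by_cases hpr : ['#', ' '].isPrefixOf rest = true
        · rw [if_pos hpr]
          simp only [Option.map_some, Nat.zero_add]
          unfold altBC
          rw [if_pos (by simpa [PySem.Chars.startswith] using hpr)]
          have hr2 : 2 ≤ rest.length := (List.isPrefixOf_iff_prefix.mp hpr).length_le
          rw [show ((l.length : Nat) : Int) + 3 = ((l.length + 1 + 2 : Nat) : Int) by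
              push_cast; ring,
            coreBC_shift rest 2 hr2,
            show (((2 : Nat) : Int)) = (2 : Int) by norm_num]
        · rw [if_neg hpr,
            altBC_no_h1 (by
              simp only [PySem.Chars.startswith]
              exact Bool.eq_false_iff.mpr hpr)]
          cases hfr : findC ['\n', '#', ' '] rest with
          | none => simp
          | some j =>
            simp only [Option.map_some]
            have hj3 : j + 3 ≤ rest.length := by simpa using findC_le hfr
            rw [show ((j + 1 + l.length : Nat) : Int) + 3
                = ((l.length + 1 + (j + 3) : Nat) : Int) by push_cast; ring,
              coreBC_shift rest (j + 3) hj3,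
              show (((j + 3 : Nat)) : Int) = ((j : Nat) : Int) + 3 by push_cast; ring]
    · -- no newline: a single line
      rw [splitNL_no_nl hnl]
      simp only [loopAC]
      unfold altBC
      simp only [PySem.Chars.startswith]
      by_cases hp : ['#', ' '].isPrefixOf cs = true
      · rw [if_pos hp, if_pos hp]
        have h2le : 2 ≤ cs.length := (List.isPrefixOf_iff_prefix.mp hp).length_le
        rw [show (2 : Int) = ((2 : Nat) : Int) by norm_num, coreBC_natCast cs 2 h2le]
        rw [findC_nl_eq_none [] (fun h => hnl (List.mem_of_mem_drop h))]
        congr 1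
        rw [show cs.length - 2 = (cs.drop 2).length by simp, List.take_length]
      · rw [if_neg hp, if_neg hp]
        rw [find_eq_findC, findC_nl_eq_none ['#', ' '] hnl]
        simp

theorem main_lemma (cs : List Char) : altBC cs = loopAC (splitNL cs) :=
  main_aux cs.length cs le_rfl

theorem loopA_map (ls : List (List Char)) :
    extractLoopA (ls.map String.ofList) = String.ofList (loopAC ls) := by
  induction ls with
  | nil => decide
  | cons l t ih =>
    simp only [List.map, extractLoopA, loopAC]
    have hsw : PySem.Str.startswith (String.ofList l) "# "
        = ['#', ' '].isPrefixOf l := by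
      simp [PySem.Str.startswith, PySem.Chars.startswith,
        show ("# " : String).toList = ['#', ' '] by decide]
    rw [hsw]
    split
    · simp only [PySem.Str.strip, PySem.Str.slice, String.toList_ofList]
      apply String.ofList_inj.mpr
      simp only [PySem.Chars.slice_eq_listSlice]
      simp [pysem]
    · exact ih

theorem a_bridge (md : String) :
    extract_title md = String.ofList (loopAC (splitNL md.toList)) := by
  unfold extract_title
  simp only [PySem.Str.split?, PySem.Chars.split?]
  rw [if_neg (by decide)]
  simp only [Option.map_some]
  rw [show ("\n" : String).toList = ['\n'] by decide, splitOn_eq_splitNL, loopA_map]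

theorem alt_bridge (md : String) :
    extract_title_alt md = String.ofList (altBC md.toList) := by
  unfold extract_title_alt altBC extractFromB coreBC
  simp only [PySem.Str.startswith, PySem.Str.find, PySem.Str.findFrom, PySem.Str.len,
    PySem.Str.strip, PySem.Str.slice, String.toList_ofList,
    show ("# " : String).toList = ['#', ' '] by decide,
    show ("\n" : String).toList = ['\n'] by decide,
    show ("\n# " : String).toList = ['\n', '#', ' '] by decide]
  split
  · rfl
  · split
    · decide
    · rfl

-- ===== VERDICT (by name: the statement is the Claim_ definition above) =====
theorem extract_title_spec : Claim_equal_extract_title := by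
  intro md _ _
  unfold Spec_extract_title
  rw [a_bridge, alt_bridge, main_lemma]
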